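-- pv_equiv track=rewrite | github.com/rsandhumcr/MsSqlExtractorAndExecutor | source_code/sql_operations.py | format_table_names
-- ===== SOURCE A (Python) =====
-- def format_table_names(table_name: str) -> str:
--     output_table_name = table_name
--     found_char = table_name.find("[")
--     if found_char == -1:
--         table_name_parts = table_name.split('.')
--         output_table_name = ''
--         for name_part in table_name_parts:
--             if output_table_name:
--                 output_table_name += '.'
--             output_table_name += f"[{name_part}]"
--     return output_table_name
-- ===== SOURCE B (Python) =====
-- def format_table_names(table_name: str) -> str:
--     if "[" in table_name:
--         return table_name
--     return "[" + table_name.replace(".", "].[") + "]"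
-- ===== Notes on version B (the rewrite author's own statement) =====
-- stated objective: idiomatic
-- what changed: Replaces the split-on-dot loop that accumulates bracketed parts joined by dots with a single string replace of '.' by '].[' plus outer brackets.
import Mathlib
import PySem

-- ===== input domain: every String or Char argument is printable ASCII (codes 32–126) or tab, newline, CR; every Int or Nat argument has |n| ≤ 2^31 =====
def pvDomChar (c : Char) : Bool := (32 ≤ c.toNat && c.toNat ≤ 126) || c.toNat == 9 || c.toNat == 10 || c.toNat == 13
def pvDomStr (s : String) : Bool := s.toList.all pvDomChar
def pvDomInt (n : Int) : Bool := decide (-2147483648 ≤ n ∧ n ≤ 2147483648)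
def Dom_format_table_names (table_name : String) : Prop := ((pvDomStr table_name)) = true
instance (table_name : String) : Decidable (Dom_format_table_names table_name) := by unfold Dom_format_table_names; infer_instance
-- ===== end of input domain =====

-- B replaces A's split-on-dot loop by a single replace of '.' with '].[' plus outer brackets (idiomatic, same cost).


-- ===== PORT A =====
-- A: find '['; if absent, split on '.' and accumulate '[part]' joined by '.' in a loop.
def format_table_names (table_name : String) : String :=
  let found_char := PySem.Str.find table_name "["
  if found_char = -1 then
    let table_name_parts := PySem.Chars.splitOn table_name.toList ['.']
    String.ofList (table_name_parts.foldl
      (fun out p => (if out.isEmpty then out else out ++ ['.']) ++ ('[' :: p ++ [']'])) [])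
  else
    table_name

-- ===== PORT B =====
-- B: guard '[' in s; else "[" + s.replace(".", "].[") + "]".
def format_table_names_alt (table_name : String) : String :=
  if PySem.Str.isIn "[" table_name then
    table_name
  else
    String.ofList ('[' :: PySem.Chars.replace table_name.toList ['.'] (']' :: '.' :: ['[']) ++ [']'])

-- ===== PRECONDITION & SPEC =====
def Spec_format_table_names (table_name : String) (out : String) : Prop := out = format_table_names_alt table_name
instance (table_name : String) (out : String) : Decidable (Spec_format_table_names table_name out) := by unfold Spec_format_table_names; infer_instance

-- ===== CLAIM (what is proved, stated in full; the proofs are below) =====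
def Claim_equal_format_table_names : Prop := ∀ (table_name : String), Dom_format_table_names table_name → Spec_format_table_names table_name (format_table_names table_name)

-- ===== LEMMAS AND PROOFS =====

-- repl l = l with every '.' expanded to "].["
def pvRepl : List Char → List Char
  | [] => []
  | c :: t => if c = '.' then ']' :: '.' :: '[' :: pvRepl t else c :: pvRepl t

-- sp l = split of l on '.'
def pvSp : List Char → List (List Char)
  | [] => [[]]
  | c :: t =>
    if c = '.' then [] :: pvSp t
    else match pvSp t with
      | p :: ps => (c :: p) :: ps
      | [] => [[c]]

theorem pvSp_ne_nil (l : List Char) : pvSp l ≠ [] := by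
  cases l with
  | nil => simp [pvSp]
  | cons c t =>
    simp only [pvSp]
    split
    · simp
    · split <;> simp

theorem pvReplace_go (l : List Char) : ∀ (fuel : Nat) (acc : List Char), l.length ≤ fuel →
    PySem.Chars.replace.go ['.'] (']' :: '.' :: ['[']) fuel l acc = acc.reverse ++ pvRepl l := by
  induction l with
  | nil => intro fuel acc _; cases fuel <;> simp [PySem.Chars.replace.go, pvRepl]
  | cons c t ih =>
    intro fuel acc h
    cases fuel with
    | zero => simp at h
    | succ n =>
      simp only [PySem.Chars.replace.go]
      by_cases hc : c = '.'
      · subst hc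
        have : List.isPrefixOf ['.'] ('.' :: t) = true := by simp [List.isPrefixOf]
        rw [if_pos this]
        simp only [List.length, List.drop]
        rw [ih n _ (by simpa using h)]
        simp [pvRepl]
      · have : List.isPrefixOf ['.'] (c :: t) = false := by
          simp [List.isPrefixOf]; exact fun e => hc e.symm
        rw [if_neg (by simp [this])]
        rw [ih n _ (by simpa using h)]
        simp [pvRepl, hc]

theorem pvSplitOn_go (l : List Char) : ∀ (fuel : Nat) (cur : List Char) (acc : List (List Char)),
    l.length ≤ fuel →
    PySem.Chars.splitOn.go ['.'] fuel l cur acc =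
      acc.reverse ++ (match pvSp l with
        | p :: ps => (cur.reverse ++ p) :: ps
        | [] => []) := by
  induction l with
  | nil => intro fuel cur acc _; cases fuel <;> simp [PySem.Chars.splitOn.go, pvSp]
  | cons c t ih =>
    intro fuel cur acc h
    cases fuel with
    | zero => simp at h
    | succ n =>
      simp only [PySem.Chars.splitOn.go]
      by_cases hc : c = '.'
      · subst hc
        have : List.isPrefixOf ['.'] ('.' :: t) = true := by simp [List.isPrefixOf]
        rw [if_pos this]
        simp only [List.length, List.drop]
        rw [ih n _ _ (by simpa using h)]
        rcases hsp : pvSp t with _ | ⟨p, ps⟩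
        · exact absurd hsp (pvSp_ne_nil t)
        · simp [pvSp, hsp]
      · have : List.isPrefixOf ['.'] (c :: t) = false := by
          simp [List.isPrefixOf]; exact fun e => hc e.symm
        rw [if_neg (by simp [this])]
        rw [ih n _ _ (by simpa using h)]
        rcases hsp : pvSp t with _ | ⟨p, ps⟩
        · exact absurd hsp (pvSp_ne_nil t)
        · simp [pvSp, hc, hsp]

-- A's loop on a nonempty accumulator appends '.[q]' for each remaining part
theorem pvFoldl_acc (ps : List (List Char)) : ∀ (acc : List Char), acc ≠ [] →
    ps.foldl (fun out p => (if out.isEmpty then out else out ++ ['.']) ++ ('[' :: p ++ [']'])) acc =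
      acc ++ ps.flatMap (fun q => '.' :: '[' :: q ++ [']']) := by
  induction ps with
  | nil => intro acc _; simp
  | cons p ps ih =>
    intro acc hacc
    simp only [List.foldl, List.flatMap_cons]
    rw [if_neg (by simpa [List.isEmpty_iff] using hacc)]
    rw [ih _ (by simp)]
    simp

-- bracketed-join of the split equals brackets around the replace
theorem pvJoin_repl (l : List Char) : ∀ (p : List Char) (ps : List (List Char)), pvSp l = p :: ps →
    '[' :: pvRepl l ++ [']'] = ('[' :: p ++ [']']) ++ ps.flatMap (fun q => '.' :: '[' :: q ++ [']']) := by
  induction l with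
  | nil => intro p ps h; simp [pvSp] at h; simp [h.1, h.2, pvRepl]
  | cons c t ih =>
    intro p ps h
    by_cases hc : c = '.'
    · subst hc
      simp only [pvSp] at h
      rcases hsp : pvSp t with _ | ⟨p', ps'⟩
      · exact absurd hsp (pvSp_ne_nil t)
      · rw [hsp] at h
        injection h with h1 h2
        subst h1; subst h2
        have := ih p' ps' hsp
        simp only [pvRepl, List.flatMap_cons, List.cons_append, List.nil_append] at this ⊢
        simp [this]
    · simp only [pvSp, if_neg hc] at h
      rcases hsp : pvSp t with _ | ⟨p', ps'⟩
      · exact absurd hsp (pvSp_ne_nil t)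
      · rw [hsp] at h
        obtain ⟨hp, hps⟩ := List.cons.inj h
        subst hps
        have := ih p' ps' hsp
        simp only [pvRepl, if_neg hc, ← hp]
        simp only [List.cons_append] at this ⊢
        rw [List.cons.injEq] at this
        rw [this.2]

-- ===== VERDICT (by name: the statement is the Claim_ definition above) =====
theorem format_table_names_spec : Claim_equal_format_table_names := by
  intro s _
  unfold Spec_format_table_names format_table_names format_table_names_alt
  by_cases hin : PySem.Str.isIn "[" s
  · rw [if_pos hin]
    have hfind : ¬ PySem.Str.find s "[" = -1 := by
      rw [PySem.Str.find_eq_neg_one_iff]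
      rw [PySem.Str.isIn_iff_infix] at hin
      exact fun h => h hin
    rw [if_neg hfind]
  · rw [if_neg hin]
    have hfind : PySem.Str.find s "[" = -1 := by
      rw [PySem.Str.find_eq_neg_one_iff]
      intro h
      exact hin ((PySem.Str.isIn_iff_infix "[" s).mpr h)
    rw [if_pos hfind]
    rw [show PySem.Chars.splitOn s.toList ['.'] =
          PySem.Chars.splitOn.go ['.'] (s.toList.length + 1) s.toList [] [] from rfl]
    rw [pvSplitOn_go _ _ _ _ (by omega)]
    rw [show PySem.Chars.replace s.toList ['.'] (']' :: '.' :: ['[']) =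
          PySem.Chars.replace.go ['.'] (']' :: '.' :: ['[']) s.toList.length s.toList [] from rfl]
    rw [pvReplace_go _ _ _ (le_refl _)]
    rcases hsp : pvSp s.toList with _ | ⟨p, ps⟩
    · exact absurd hsp (pvSp_ne_nil s.toList)
    · simp only [List.reverse_nil, List.nil_append]
      rw [List.foldl_cons]
      rw [if_pos (by simp)]
      simp only [List.nil_append]
      rw [pvFoldl_acc _ _ (by simp)]
      rw [pvJoin_repl s.toList p ps hsp]
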